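-- pv_equiv track=rewrite | github.com/DCSR6667/ds | patterns/recursion/backtracking_and_subset/asciisubsequence.py | asciiseq
-- ===== SOURCE A (Python) =====
-- def asciiseq(ans,s):
--     if len(s)==0:
--         l=[]
--         l.append(ans)
--         return l
--     a=asciiseq(ans+s[0],s[1:])
--     b=asciiseq(ans,s[1:])
--     c=asciiseq(ans+str(ord(s[0])),s[1:])
--     return a+b+c
-- ===== SOURCE B (Python) =====
-- def asciiseq(ans, s):
--     n = len(s)
--     ext = [(ch, "", str(ord(ch))) for ch in s]
--     out = []
--     for k in range(3 ** n):
--         pieces = []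
--         for t in reversed(ext):
--             k, d = divmod(k, 3)
--             pieces.append(t[d])
--         pieces.append(ans)
--         pieces.reverse()
--         out.append("".join(pieces))
--     return out
-- ===== Notes on version B (the rewrite author's own statement) =====
-- stated objective: alternative
-- what changed: Replaced the triple recursion with slicing by direct ternary indexing: each output index k in range(3**n) is decoded digit by digit (0=keep char, 1=omit, 2=ascii code, first character most significant) and the string is assembled from the precomputed extension table, so no recursion and no intermediate result lists exist.
import Mathlib
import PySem

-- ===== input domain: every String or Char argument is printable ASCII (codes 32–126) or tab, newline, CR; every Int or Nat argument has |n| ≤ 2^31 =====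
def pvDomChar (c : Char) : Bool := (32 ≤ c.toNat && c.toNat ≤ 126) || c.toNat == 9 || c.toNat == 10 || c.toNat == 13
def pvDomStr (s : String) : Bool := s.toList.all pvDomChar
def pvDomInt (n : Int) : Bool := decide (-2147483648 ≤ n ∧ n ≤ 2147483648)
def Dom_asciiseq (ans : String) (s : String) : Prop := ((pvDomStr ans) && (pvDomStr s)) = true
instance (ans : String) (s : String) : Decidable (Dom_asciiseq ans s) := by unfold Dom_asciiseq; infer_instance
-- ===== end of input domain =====

-- B replaces A's triple recursion by ternary indexing of the 3^n outputs; alternative decomposition, same cost.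

-- ===== PORT A =====
-- Transliteration of A's triple recursion; recursion is on s's character list
-- (s[0] / s[1:] become head/tail), string building uses the same ++ steps.
def asciiseqL (ans : String) : List Char → List String
  | [] => [ans]
  | c :: rest =>
    let a := asciiseqL (ans ++ String.singleton c) rest
    let b := asciiseqL ans rest
    let cc := asciiseqL (ans ++ PySem.Int.toStr (c.toNat : Int)) rest
    a ++ b ++ cc

def asciiseq (ans : String) (s : String) : List String := asciiseqL ans s.toList

-- ===== PORT B =====
-- ext[i][d]: the Python 3-tuple indexed by the ternary digit d
def pickExt (t : String × String × String) (d : Nat) : String :=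
  if d = 0 then t.1 else if d = 1 then t.2.1 else t.2.2

-- inner loop 'for t in reversed(ext): k, d = divmod(k, 3); pieces.append(t[d])'
-- (structural recursion over the reversed list, same k/pieces state)
def buildPieces : List (String × String × String) → Nat → List String → List String
  | [], _, pieces => pieces
  | t :: rest, k, pieces => buildPieces rest (k / 3) (pieces ++ [pickExt t (k % 3)])

-- B: decode each output index k ∈ range(3^n) into its ternary digits (least
-- significant digit = last character); append ans, reverse, join.
def asciiseq_alt (ans : String) (s : String) : List String :=
  let cs := s.toList
  let n := cs.length
  let ext := cs.map (fun ch => (String.singleton ch, "", PySem.Int.toStr (ch.toNat : Int)))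
  (List.range (3 ^ n)).foldl
    (fun out k => out ++ [String.join ((buildPieces ext.reverse k [] ++ [ans]).reverse)])
    []

-- ===== PRECONDITION & SPEC =====
def Spec_asciiseq (ans : String) (s : String) (out : List String) : Prop := out = asciiseq_alt ans s
instance (ans : String) (s : String) (out : List String) : Decidable (Spec_asciiseq ans s out) := by unfold Spec_asciiseq; infer_instance

-- ===== CLAIM (what is proved, stated in full; the proofs are below) =====
def Claim_equal_asciiseq : Prop := ∀ (ans : String) (s : String), Dom_asciiseq ans s → Spec_asciiseq ans s (asciiseq ans s)

-- ===== LEMMAS AND PROOFS =====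

-- extension triple of one character
def extT (c : Char) : String × String × String :=
  (String.singleton c, "", PySem.Int.toStr (c.toNat : Int))

-- Reference decoder: build the string left to right, the digit of the next
-- character being k / 3^(number of remaining characters) % 3.
def gDec (ans : String) : List Char → Nat → String
  | [], _ => ans
  | c :: rest, k => gDec (ans ++ pickExt (extT c) (k / 3 ^ rest.length % 3)) rest k

theorem gDec_mod (cs : List Char) (ans : String) (k : Nat) :
    gDec ans cs (k % 3 ^ cs.length) = gDec ans cs k := by
  induction cs generalizing ans k with
  | nil => rfl
  | cons c rest ih =>
    simp only [gDec, List.length_cons]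
    have hdig : k % 3 ^ (rest.length + 1) / 3 ^ rest.length % 3
        = k / 3 ^ rest.length % 3 := by
      rw [pow_succ, Nat.mod_mul_right_div_self]; omega
    have hmod : k % 3 ^ (rest.length + 1) % 3 ^ rest.length = k % 3 ^ rest.length :=
      Nat.mod_mod_of_dvd k (pow_dvd_pow 3 (Nat.le_succ _))
    rw [hdig, ← ih _ (k % 3 ^ (rest.length + 1)), hmod, ih]

-- A's recursion enumerates exactly the decoded indices, in order.
theorem asciiseqL_eq_map_gDec (cs : List Char) (ans : String) :
    asciiseqL ans cs = (List.range (3 ^ cs.length)).map (gDec ans cs) := by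
  induction cs generalizing ans with
  | nil => simp [asciiseqL, gDec]
  | cons c rest ih =>
    have hn : (0 : Nat) < 3 ^ rest.length := pow_pos (by norm_num) _
    have hsplit : (3 : Nat) ^ (c :: rest).length
        = 3 ^ rest.length + (3 ^ rest.length + 3 ^ rest.length) := by
      simp only [List.length_cons, pow_succ]; ring
    rw [hsplit, List.range_add, List.range_add]
    simp only [List.map_append, List.map_map]
    have h0 : (List.range (3 ^ rest.length)).map (gDec ans (c :: rest))
        = (List.range (3 ^ rest.length)).map (gDec (ans ++ String.singleton c) rest) := by
      apply List.map_congr_left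
      intro k hk
      rw [List.mem_range] at hk
      simp only [gDec]
      rw [Nat.div_eq_of_lt hk]
      rfl
    have h1 : ∀ k < 3 ^ rest.length,
        gDec ans (c :: rest) (3 ^ rest.length + k) = gDec ans rest k := by
      intro k hk
      simp only [gDec]
      have hd : (3 ^ rest.length + k) / 3 ^ rest.length = 1 := by
        rw [Nat.add_div_left _ hn, Nat.div_eq_of_lt hk]
      rw [hd]
      have he : ans ++ pickExt (extT c) (1 % 3) = ans := by
        simp [pickExt, extT]
      rw [he, ← gDec_mod rest ans (3 ^ rest.length + k), Nat.add_mod_left,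
        Nat.mod_eq_of_lt hk]
    have h2 : ∀ k < 3 ^ rest.length,
        gDec ans (c :: rest) (3 ^ rest.length + (3 ^ rest.length + k))
          = gDec (ans ++ PySem.Int.toStr (c.toNat : Int)) rest k := by
      intro k hk
      simp only [gDec]
      have hd : (3 ^ rest.length + (3 ^ rest.length + k)) / 3 ^ rest.length = 2 := by
        rw [Nat.add_div_left _ hn, Nat.add_div_left _ hn, Nat.div_eq_of_lt hk]
      rw [hd]
      have he : pickExt (extT c) (2 % 3) = PySem.Int.toStr (c.toNat : Int) := by
        simp [pickExt, extT]
      rw [he, ← gDec_mod rest _ (3 ^ rest.length + (3 ^ rest.length + k)),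
        Nat.add_mod_left, Nat.add_mod_left, Nat.mod_eq_of_lt hk]
    have e1 : List.map (gDec ans (c :: rest) ∘ fun x => 3 ^ rest.length + x)
          (List.range (3 ^ rest.length))
        = List.map (gDec ans rest) (List.range (3 ^ rest.length)) :=
      List.map_congr_left (fun k hk => by simpa using h1 k (List.mem_range.mp hk))
    have e2 : List.map (gDec ans (c :: rest) ∘ (fun x => 3 ^ rest.length + x) ∘ fun x => 3 ^ rest.length + x)
          (List.range (3 ^ rest.length))
        = List.map (gDec (ans ++ PySem.Int.toStr (c.toNat : Int)) rest) (List.range (3 ^ rest.length)) :=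
      List.map_congr_left (fun k hk => by simpa [← Nat.add_assoc] using h2 k (List.mem_range.mp hk))
    rw [h0, e1, e2]
    simp only [asciiseqL]
    rw [ih, ih, ih, List.append_assoc]

-- the pieces the inner loop collects: one digit per element, LSB first
def digitsMap : List (String × String × String) → Nat → List String
  | [], _ => []
  | t :: rest, k => pickExt t (k % 3) :: digitsMap rest (k / 3)

theorem buildPieces_eq (r : List (String × String × String)) (k : Nat) (p : List String) :
    buildPieces r k p = p ++ digitsMap r k := by
  induction r generalizing k p with
  | nil => simp [buildPieces, digitsMap]
  | cons t rest ih => simp [buildPieces, digitsMap, ih]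

theorem digitsMap_append (l₁ l₂ : List (String × String × String)) (k : Nat) :
    digitsMap (l₁ ++ l₂) k = digitsMap l₁ k ++ digitsMap l₂ (k / 3 ^ l₁.length) := by
  induction l₁ generalizing k with
  | nil => simp [digitsMap]
  | cons t rest ih =>
    simp only [List.cons_append, digitsMap, ih, List.length_cons]
    rw [Nat.div_div_eq_div_mul, ← pow_succ']

-- the joined, reversed pieces equal the reference decoder
theorem join_buildPieces (cs : List Char) (ans : String) (k : Nat) :
    String.join ((buildPieces (cs.map extT).reverse k [] ++ [ans]).reverse)
      = gDec ans cs k := by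
  induction cs generalizing ans with
  | nil => simp [buildPieces, String.join, gDec]
  | cons c rest ih =>
    rw [buildPieces_eq] at ih ⊢
    simp only [List.map_cons, List.reverse_cons, digitsMap_append, List.length_reverse,
      List.length_map, gDec]
    have hone : digitsMap [extT c] (k / 3 ^ rest.length)
        = [pickExt (extT c) (k / 3 ^ rest.length % 3)] := by
      simp [digitsMap]
    rw [hone]
    simp only [List.nil_append, List.append_assoc] at ih ⊢
    rw [← List.append_assoc]
    have hjoin : ∀ (L : List String) (a b : String),
        String.join (((L ++ [b]) ++ [a]).reverse) = String.join ((L ++ [a ++ b]).reverse) := by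
      intro L a b
      simp [String.join]
    rw [hjoin, ih]

-- ===== VERDICT (by name: the statement is the Claim_ definition above) =====
theorem asciiseq_spec : Claim_equal_asciiseq := by
  intro ans s _
  unfold Spec_asciiseq asciiseq asciiseq_alt
  rw [PySem.List.foldl_append_singleton_eq_map
    (f := fun k => String.join ((buildPieces ((s.toList.map (fun ch => (String.singleton ch, "", PySem.Int.toStr (ch.toNat : Int)))).reverse) k [] ++ [ans]).reverse))]
  rw [asciiseqL_eq_map_gDec]
  simp only [List.nil_append]
  exact List.map_congr_left (fun k _ => (join_buildPieces s.toList ans k).symm)
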